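-- pv_equiv track=rewrite | github.com/svinota/cxnet | cxnet/utils.py | mask_unknown
-- ===== SOURCE A (Python) =====
-- def mask_unknown(st):
--     """
--     Detect mask by zero bytes
--     """
--     st = st.split(".")
--     st.reverse()
--     mask = 32
--     c = [32]
--     for i in st:
--         mask -= 8
--         if i == "0":
--             c.append(mask)
--     return c[-1]
-- ===== SOURCE B (Python) =====
-- def mask_unknown(st):
--     """
--     Detect mask by zero bytes
--     """
--     parts = st.split(".")
--     n = len(parts)
--     for j, octet in enumerate(parts):
--         if octet == "0":
--             return 32 - 8 * (n - j)
--     return 32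
-- ===== Notes on version B (the rewrite author's own statement) =====
-- stated objective: simpler
-- what changed: Replaces the reverse pass plus the accumulator list of candidate masks with a forward scan that returns the closed-form mask 32 - 8*(n - j) at the first zero octet (no list reversal, no accumulator).
import Mathlib
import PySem

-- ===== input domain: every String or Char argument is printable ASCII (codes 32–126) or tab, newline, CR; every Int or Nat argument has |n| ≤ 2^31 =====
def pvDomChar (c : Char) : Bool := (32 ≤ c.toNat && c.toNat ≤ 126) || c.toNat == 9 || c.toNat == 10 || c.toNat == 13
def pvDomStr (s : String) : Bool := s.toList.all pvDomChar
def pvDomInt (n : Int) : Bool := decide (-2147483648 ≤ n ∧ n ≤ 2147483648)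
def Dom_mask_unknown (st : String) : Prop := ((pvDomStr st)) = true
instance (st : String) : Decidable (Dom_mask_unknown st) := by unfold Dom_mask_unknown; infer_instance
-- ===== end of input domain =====

-- B replaces A's reverse pass and accumulator list with a forward scan returning the
-- closed-form mask 32 - 8*(n - j) at the first zero octet (objective: simpler).

-- ===== PORT A =====
-- one loop step of A: mask -= 8; if i == "0": c.append(mask)
def pvAStep (s : Int × List Int) (i : String) : Int × List Int :=
  (s.1 - 8, if i = "0" then s.2 ++ [s.1 - 8] else s.2)

def mask_unknown (st : String) : Int :=
  -- st.split(".") : sep "." ≠ "", so split? is always some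
  let parts := (PySem.Str.split? st ".").getD []
  let parts := parts.reverse
  let s := parts.foldl pvAStep (32, [32])
  -- c[-1]: c starts as [32], so it is never empty and pyGet? never fails
  (PySem.List.pyGet? s.2 (-1)).getD 0

-- ===== PORT B =====
-- forward scan over enumerate(parts): first octet "0" at index j yields 32 - 8*(n - j)
def pvAltGo (n : Int) : List String → Int → Int
  | [], _ => 32
  | x :: xs, j => if x = "0" then 32 - 8 * (n - j) else pvAltGo n xs (j + 1)

def mask_unknown_alt (st : String) : Int :=
  let parts := (PySem.Str.split? st ".").getD []
  pvAltGo (parts.length : Int) parts 0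

-- ===== PRECONDITION & SPEC =====
def Spec_mask_unknown (st : String) (out : Int) : Prop := out = mask_unknown_alt st
instance (st : String) (out : Int) : Decidable (Spec_mask_unknown st out) := by unfold Spec_mask_unknown; infer_instance

-- ===== CLAIM (what is proved, stated in full; the proofs are below) =====
def Claim_equal_mask_unknown : Prop := ∀ (st : String), Dom_mask_unknown st → Spec_mask_unknown st (mask_unknown st)

-- ===== LEMMAS AND PROOFS =====

-- the getLast? of A's accumulator after folding over xs.reverse, as a forward recursion
def pvAux : List String → Option Int → Option Int
  | [], d => d
  | x :: t, d => if x = "0" then some (32 - 8 * ((t.length : Int) + 1)) else pvAux t d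

theorem pvAStep_fst (xs : List String) (m : Int) (c : List Int) :
    (xs.foldl pvAStep (m, c)).1 = m - 8 * xs.length := by
  induction xs generalizing m c with
  | nil => simp
  | cons x t ih => simp [pvAStep, ih]; ring

theorem pvFold_getLast (xs : List String) (c : List Int) :
    ((xs.reverse.foldl pvAStep (32, c)).2).getLast? = pvAux xs c.getLast? := by
  induction xs generalizing c with
  | nil => simp [pvAux]
  | cons x t ih =>
    have : (x :: t).reverse = t.reverse ++ [x] := by simp
    rw [this, List.foldl_append]
    have hfold : (t.reverse.foldl pvAStep (32, c)) =
        ((t.reverse.foldl pvAStep (32, c)).1, (t.reverse.foldl pvAStep (32, c)).2) := rfl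
    rw [hfold]
    have hf : (t.reverse.foldl pvAStep (32, c)).1 = 32 - 8 * t.length := by
      simpa using pvAStep_fst t.reverse 32 c
    simp only [List.foldl_cons, List.foldl_nil, pvAStep, hf, pvAux]
    by_cases hx : x = "0"
    · simp [hx]; ring
    · rw [if_neg hx, if_neg hx]
      exact ih c

theorem pvAux_isSome (xs : List String) (d : Int) : (pvAux xs (some d)).isSome := by
  induction xs with
  | nil => simp [pvAux]
  | cons x t ih => by_cases hx : x = "0" <;> simp [pvAux, hx, ih]

theorem pvAltGo_eq_aux (xs : List String) (n j : Int) (h : n - j = xs.length) :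
    pvAltGo n xs j = (pvAux xs (some 32)).getD 0 := by
  induction xs generalizing j with
  | nil => simp [pvAltGo, pvAux]
  | cons x t ih =>
    by_cases hx : x = "0"
    · simp only [pvAltGo, pvAux, hx, if_true, Option.getD_some]
      simp at h
      omega
    · simp only [pvAltGo, pvAux, hx, if_false]
      apply ih
      simp at h
      omega

-- ===== VERDICT (by name: the statement is the Claim_ definition above) =====
theorem mask_unknown_spec : Claim_equal_mask_unknown := by
  intro st _
  unfold Spec_mask_unknown
  show (PySem.List.pyGet? (((PySem.Str.split? st ".").getD []).reverse.foldl pvAStep (32, [32])).2 (-1)).getD 0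
      = pvAltGo ((((PySem.Str.split? st ".").getD []).length : Int)) ((PySem.Str.split? st ".").getD []) 0
  set parts := (PySem.Str.split? st ".").getD [] with hp
  have hlast := pvFold_getLast parts [32]
  simp only [List.getLast?_singleton] at hlast
  have halt := pvAltGo_eq_aux parts (parts.length : Int) 0 (by simp)
  have hsome := pvAux_isSome parts 32
  obtain ⟨v, hv⟩ := Option.isSome_iff_exists.mp hsome
  have hne : ((parts.reverse.foldl pvAStep (32, [32])).2) ≠ [] := by
    intro hnil
    rw [hnil] at hlast
    simp [hv] at hlast
  rw [PySem.List.pyGet?_neg_one, hlast, hv, halt, hv]
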